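-- pv_equiv track=rewrite | github.com/Zhao-Group/COPIES | code/main.py | ambg_nt_replacement
-- ===== SOURCE A (Python) =====
-- def ambg_nt_replacement(seq_list, ambiguous_nucleotides):
--     for i in range(len(seq_list)):
--         text = seq_list[i]
--         if any(s in text for s in ambiguous_nucleotides):
--             text = text.replace('M', 'A')
--             text = text.replace('R', 'A')
--             text = text.replace('W', 'A')
--             text = text.replace('S', 'C')
--             text = text.replace('Y', 'C')
--             text = text.replace('K', 'G')
--             text = text.replace('V', 'A')
--             text = text.replace('H', 'A')
--             text = text.replace('D', 'A')
--             text = text.replace('B', 'C')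
--             text = text.replace('N', 'A')
--
--             seq_list[i] = text
--
--     return seq_list
-- ===== SOURCE B (Python) =====
-- def ambg_nt_replacement(seq_list, ambiguous_nucleotides):
--     mapping = {'M': 'A', 'R': 'A', 'W': 'A', 'S': 'C', 'Y': 'C', 'K': 'G',
--                'V': 'A', 'H': 'A', 'D': 'A', 'B': 'C', 'N': 'A'}
--     for i, text in enumerate(seq_list):
--         if any(s in text for s in ambiguous_nucleotides):
--             seq_list[i] = ''.join(mapping.get(c, c) for c in text)
--     return seq_list
-- ===== Notes on version B (the rewrite author's own statement) =====
-- stated objective: simpler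
-- what changed: Replaces the chain of eleven full-string str.replace scans with one substitution dict built once and a single per-character pass over each flagged string.
import Mathlib
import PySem

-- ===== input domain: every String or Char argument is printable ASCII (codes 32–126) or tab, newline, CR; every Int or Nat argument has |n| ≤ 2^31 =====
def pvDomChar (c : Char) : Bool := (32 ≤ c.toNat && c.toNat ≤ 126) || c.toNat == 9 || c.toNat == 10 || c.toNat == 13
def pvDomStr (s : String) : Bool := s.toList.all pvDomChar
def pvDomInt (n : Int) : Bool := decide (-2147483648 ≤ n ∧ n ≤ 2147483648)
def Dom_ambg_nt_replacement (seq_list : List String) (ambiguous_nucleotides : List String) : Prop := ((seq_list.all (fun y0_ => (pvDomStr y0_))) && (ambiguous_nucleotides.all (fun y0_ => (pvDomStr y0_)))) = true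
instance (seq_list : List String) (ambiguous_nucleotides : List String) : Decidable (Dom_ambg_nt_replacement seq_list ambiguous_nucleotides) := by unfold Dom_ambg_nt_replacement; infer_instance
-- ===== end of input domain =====

-- B replaces A's chain of eleven full-string replace scans by one substitution table and a
-- single per-character pass over each flagged string (objective: simpler). Both A and B mutate
-- seq_list in place in Python; the equivalence proved here is about the returned value.

-- ===== PORT A =====
-- the eleven sequential str.replace calls, in A's order
def pvChainA (text : String) : String :=
  let text := PySem.Str.replace text "M" "A"
  let text := PySem.Str.replace text "R" "A"
  let text := PySem.Str.replace text "W" "A"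
  let text := PySem.Str.replace text "S" "C"
  let text := PySem.Str.replace text "Y" "C"
  let text := PySem.Str.replace text "K" "G"
  let text := PySem.Str.replace text "V" "A"
  let text := PySem.Str.replace text "H" "A"
  let text := PySem.Str.replace text "D" "A"
  let text := PySem.Str.replace text "B" "C"
  PySem.Str.replace text "N" "A"

def ambg_nt_replacement (seq_list : List String) (ambiguous_nucleotides : List String) : List String :=
  (PySem.List.pyRange 0 seq_list.length 1).foldl
    (fun l i =>
      let text := PySem.List.pyGetD l i ""
      if ambiguous_nucleotides.any (fun s => PySem.Str.isIn s text) then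
        PySem.List.pySetD l i (pvChainA text)
      else l)
    seq_list

-- ===== PORT B =====
def pvMapping : PySem.Dict Char Char :=
  PySem.Dict.ofList [('M','A'),('R','A'),('W','A'),('S','C'),('Y','C'),('K','G'),
                     ('V','A'),('H','A'),('D','A'),('B','C'),('N','A')]

def ambg_nt_replacement_alt (seq_list : List String) (ambiguous_nucleotides : List String) : List String :=
  seq_list.map (fun text =>
    if ambiguous_nucleotides.any (fun s => PySem.Str.isIn s text) then
      String.ofList (text.toList.map (fun c => pvMapping.getD c c))
    else text)

-- ===== PRECONDITION & SPEC =====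
def Spec_ambg_nt_replacement (seq_list : List String) (ambiguous_nucleotides : List String) (out : List String) : Prop := out = ambg_nt_replacement_alt seq_list ambiguous_nucleotides
instance (seq_list : List String) (ambiguous_nucleotides : List String) (out : List String) : Decidable (Spec_ambg_nt_replacement seq_list ambiguous_nucleotides out) := by unfold Spec_ambg_nt_replacement; infer_instance

-- ===== CLAIM (what is proved, stated in full; the proofs are below) =====
def Claim_equal_ambg_nt_replacement : Prop := ∀ (seq_list : List String) (ambiguous_nucleotides : List String), Dom_ambg_nt_replacement seq_list ambiguous_nucleotides → Spec_ambg_nt_replacement seq_list ambiguous_nucleotides (ambg_nt_replacement seq_list ambiguous_nucleotides)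

-- ===== LEMMAS AND PROOFS =====

def pvStepC (a b c : Char) : Char := if c == a then b else c

-- single-character replace is a character map
lemma replace_go_single (a b : Char) : ∀ (fuel : Nat) (l acc : List Char), l.length ≤ fuel →
    PySem.Chars.replace.go [a] [b] fuel l acc
      = acc.reverse ++ l.map (pvStepC a b) := by
  intro fuel
  induction fuel with
  | zero =>
    intro l acc h
    have : l = [] := List.eq_nil_of_length_eq_zero (Nat.le_zero.mp h)
    subst this
    simp [PySem.Chars.replace.go]
  | succ n ih =>
    intro l acc h
    cases l with
    | nil => simp [PySem.Chars.replace.go]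
    | cons c t =>
      by_cases hc : c = a
      · subst hc
        have hpre : [c].isPrefixOf (c :: t) = true := by simp [List.isPrefixOf]
        rw [PySem.Chars.replace.go]
        simp only [hpre, if_true, List.length_singleton, List.drop_one, List.tail_cons]
        rw [ih t (List.reverse [b] ++ acc) (by simpa using Nat.le_of_succ_le_succ h)]
        simp [pvStepC]
      · have hpre : [a].isPrefixOf (c :: t) = false := by
          simp [List.isPrefixOf, BEq.beq]
          intro hh; exact absurd hh.symm hc
        rw [PySem.Chars.replace.go]
        simp only [hpre]
        rw [ih t (c :: acc) (by simpa using Nat.le_of_succ_le_succ h)]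
        simp [pvStepC, hc]

lemma chars_replace_single (a b : Char) (s : List Char) :
    PySem.Chars.replace s [a] [b] = s.map (pvStepC a b) := by
  unfold PySem.Chars.replace
  rw [if_neg (by simp)]
  rw [replace_go_single a b s.length s [] (le_refl _)]
  simp

-- the composed 11-step character map equals one table lookup
lemma chain_char (c : Char) :
    pvStepC 'N' 'A' (pvStepC 'B' 'C' (pvStepC 'D' 'A' (pvStepC 'H' 'A' (pvStepC 'V' 'A'
      (pvStepC 'K' 'G' (pvStepC 'Y' 'C' (pvStepC 'S' 'C' (pvStepC 'W' 'A'
      (pvStepC 'R' 'A' (pvStepC 'M' 'A' c)))))))))) = pvMapping.getD c c := by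
  by_cases h1 : c = 'M'; · subst h1; decide
  by_cases h2 : c = 'R'; · subst h2; decide
  by_cases h3 : c = 'W'; · subst h3; decide
  by_cases h4 : c = 'S'; · subst h4; decide
  by_cases h5 : c = 'Y'; · subst h5; decide
  by_cases h6 : c = 'K'; · subst h6; decide
  by_cases h7 : c = 'V'; · subst h7; decide
  by_cases h8 : c = 'H'; · subst h8; decide
  by_cases h9 : c = 'D'; · subst h9; decide
  by_cases h10 : c = 'B'; · subst h10; decide
  by_cases h11 : c = 'N'; · subst h11; decide
  have hk : pvMapping.keys = ['M','R','W','S','Y','K','V','H','D','B','N'] := by decide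
  have hc : pvMapping.contains c = false := by
    rw [PySem.Dict.contains_eq_decide_mem_keys, hk]
    simp [h1, h2, h3, h4, h5, h6, h7, h8, h9, h10, h11]
  rw [PySem.Dict.getD_of_not_contains _ _ hc]
  simp [pvStepC, h1, h2, h3, h4, h5, h6, h7, h8, h9, h10, h11]

lemma chainA_eq_map (text : String) :
    pvChainA text = String.ofList (text.toList.map (fun c => pvMapping.getD c c)) := by
  have h : (pvChainA text).toList = text.toList.map (fun c => pvMapping.getD c c) := by
    unfold pvChainA
    have tA : ("A" : String).toList = ['A'] := by decide
    have tB : ("B" : String).toList = ['B'] := by decide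
    have tC : ("C" : String).toList = ['C'] := by decide
    have tD : ("D" : String).toList = ['D'] := by decide
    have tG : ("G" : String).toList = ['G'] := by decide
    have tH : ("H" : String).toList = ['H'] := by decide
    have tK : ("K" : String).toList = ['K'] := by decide
    have tM : ("M" : String).toList = ['M'] := by decide
    have tN : ("N" : String).toList = ['N'] := by decide
    have tR : ("R" : String).toList = ['R'] := by decide
    have tS : ("S" : String).toList = ['S'] := by decide
    have tV : ("V" : String).toList = ['V'] := by decide
    have tW : ("W" : String).toList = ['W'] := by decide
    have tY : ("Y" : String).toList = ['Y'] := by decide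
    simp only [PySem.Str.toList_replace, tA, tB, tC, tD, tG, tH, tK, tM, tN, tR, tS, tV, tW, tY,
               chars_replace_single, List.map_map]
    refine List.map_congr_left (fun c _ => ?_)
    simp only [Function.comp_apply]
    exact chain_char c
  calc pvChainA text = String.ofList (pvChainA text).toList := by simp
    _ = String.ofList (text.toList.map (fun c => pvMapping.getD c c)) := by rw [h]

-- the index loop of A computes an element-wise map
lemma foldl_set_map (g : String → Bool) (f : String → String) :
    ∀ (n : Nat) (xs : List String), n ≤ xs.length →
    (PySem.List.pyRange 0 n 1).foldl
      (fun l i =>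
        let text := PySem.List.pyGetD l i ""
        if g text then PySem.List.pySetD l i (f text) else l) xs
      = (xs.take n).map (fun t => if g t then f t else t) ++ xs.drop n := by
  intro n
  induction n with
  | zero => intro xs _; simp [PySem.List.pyRange_one_eq_nil]
  | succ n ih =>
    intro xs h
    have hn : n ≤ xs.length := Nat.le_of_succ_le h
    have hlt : n < xs.length := h
    have hsplit : PySem.List.pyRange 0 ((n : Int) + 1) 1
        = PySem.List.pyRange 0 (n : Int) 1 ++ [(n : Int)] :=
      PySem.List.pyRange_one_succ_right (by positivity)
    have hcast : ((n + 1 : Nat) : Int) = (n : Int) + 1 := by push_cast; ring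
    rw [hcast, hsplit, List.foldl_append, ih xs hn]
    simp only [List.foldl_cons, List.foldl_nil]
    have hlen : ((xs.take n).map (fun t => if g t then f t else t)).length = n := by
      simp [List.length_take, Nat.min_eq_left hn]
    have hget : PySem.List.pyGetD
        ((xs.take n).map (fun t => if g t then f t else t) ++ xs.drop n) (n : Int) "" = xs[n] := by
      rw [PySem.List.pyGetD_natCast, List.getD_eq_getElem?_getD,
          List.getElem?_append_right (le_of_eq hlen)]
      rw [hlen, Nat.sub_self]
      simp [List.getElem?_drop, List.getElem?_eq_getElem hlt]
    rw [hget]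
    have hdrop : xs.drop n = xs[n] :: xs.drop (n + 1) := by
      rw [List.drop_eq_getElem_cons hlt]
    have htake : xs.take (n + 1) = xs.take n ++ [xs[n]] := by
      rw [List.take_add_one, List.getElem?_eq_getElem hlt]
      rfl
    rw [htake, List.map_append, List.map_singleton]
    by_cases hg : g xs[n]
    · simp only [hg, if_true]
      rw [PySem.List.pySetD_natCast, List.set_append, hlen]
      rw [if_neg (Nat.lt_irrefl n), Nat.sub_self, hdrop, List.set_cons_zero]
      simp
    · simp only [hg]
      rw [hdrop]
      simp

-- ===== VERDICT (by name: the statement is the Claim_ definition above) =====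
theorem ambg_nt_replacement_spec : Claim_equal_ambg_nt_replacement := by
  intro seq_list ambiguous_nucleotides _
  unfold Spec_ambg_nt_replacement ambg_nt_replacement ambg_nt_replacement_alt
  rw [foldl_set_map (fun text => ambiguous_nucleotides.any (fun s => PySem.Str.isIn s text))
        pvChainA seq_list.length seq_list (le_refl _)]
  simp only [List.take_length, List.drop_length, List.append_nil]
  exact List.map_congr_left (fun t _ => if_congr Iff.rfl (chainA_eq_map t) rfl)
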